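-- pv_equiv track=rewrite | github.com/LudovicSterlin/advent-of-code-2020 | day5/day5.py | found_seat
-- ===== SOURCE A (Python) =====
-- def found_seat(b_pass, nrows=128, ncols=8):
--     rows = list(range(nrows))
--     cols = list(range(ncols))
--     row_indics = b_pass[:7]
--     col_indics = b_pass[7:]
--     for token in row_indics:
--         if token == "F":
--             rows = rows[: len(rows) // 2]
--         elif token == "B":
--             rows = rows[len(rows) // 2 :]
--     for token in col_indics:
--         if token == "L":
--             cols = cols[: len(cols) // 2]
--         elif token == "R":
--             cols = cols[len(cols) // 2 :]
--     row, column, seat_id = rows[0], cols[0], rows[0] * 8 + cols[0]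
--     return row, column, seat_id
-- ===== SOURCE B (Python) =====
-- def found_seat(b_pass, nrows=128, ncols=8):
--     lo, hi = 0, nrows
--     for t in b_pass[:7]:
--         half = (hi - lo) // 2
--         if t == "F":
--             hi = lo + half
--         elif t == "B":
--             lo = lo + half
--     lo2, hi2 = 0, ncols
--     for t in b_pass[7:]:
--         half = (hi2 - lo2) // 2
--         if t == "L":
--             hi2 = lo2 + half
--         elif t == "R":
--             lo2 = lo2 + half
--     return lo, lo2, lo * 8 + lo2
-- ===== Notes on version B (the rewrite author's own statement) =====
-- stated objective: alternative
-- what changed: Replaces the materialised candidate lists list(range(nrows))/list(range(ncols)) and their repeated half-slicing by two integer bound pairs (lo,hi) updated with floor-division midpoints, so no list is ever built or sliced.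
import Mathlib
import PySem

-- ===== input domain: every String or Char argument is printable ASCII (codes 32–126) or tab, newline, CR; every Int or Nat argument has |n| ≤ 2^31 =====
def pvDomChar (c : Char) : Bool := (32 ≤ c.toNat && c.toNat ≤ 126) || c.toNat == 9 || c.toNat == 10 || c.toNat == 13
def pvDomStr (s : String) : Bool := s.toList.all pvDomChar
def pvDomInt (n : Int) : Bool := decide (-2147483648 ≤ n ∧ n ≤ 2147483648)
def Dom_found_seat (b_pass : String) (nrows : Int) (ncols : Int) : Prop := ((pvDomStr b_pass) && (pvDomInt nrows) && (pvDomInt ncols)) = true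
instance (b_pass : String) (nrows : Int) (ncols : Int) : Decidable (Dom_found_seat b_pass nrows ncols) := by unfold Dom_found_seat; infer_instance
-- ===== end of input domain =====

-- B tracks an integer bound pair per axis instead of materialising and slicing A's candidate lists (alternative algorithm; return value proved equal on Pre_).

-- ===== PORT A =====
def found_seat (b_pass : String) (nrows : Int) (ncols : Int) : Int × Int × Int :=
  let rows0 := PySem.List.pyRange 0 nrows 1
  let cols0 := PySem.List.pyRange 0 ncols 1
  let row_indics := (PySem.Str.slice b_pass none (some 7)).toList
  let col_indics := (PySem.Str.slice b_pass (some 7) none).toList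
  let rows := row_indics.foldl (fun rows token =>
    if token = 'F' then PySem.List.slice rows none (some (PySem.Int.floordiv (rows.length : Int) 2))
    else if token = 'B' then PySem.List.slice rows (some (PySem.Int.floordiv (rows.length : Int) 2)) none
    else rows) rows0
  let cols := col_indics.foldl (fun cols token =>
    if token = 'L' then PySem.List.slice cols none (some (PySem.Int.floordiv (cols.length : Int) 2))
    else if token = 'R' then PySem.List.slice cols (some (PySem.Int.floordiv (cols.length : Int) 2)) none
    else cols) cols0
  -- rows[0] / cols[0]: Python raises IndexError on an empty list; Pre_ excludes that, default 0 here
  (PySem.List.pyGetD rows 0 0, PySem.List.pyGetD cols 0 0,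
   PySem.List.pyGetD rows 0 0 * 8 + PySem.List.pyGetD cols 0 0)

-- ===== PORT B =====
def found_seat_alt (b_pass : String) (nrows : Int) (ncols : Int) : Int × Int × Int :=
  let p := ((PySem.Str.slice b_pass none (some 7)).toList).foldl (fun (p : Int × Int) t =>
    if t = 'F' then (p.1, p.1 + PySem.Int.floordiv (p.2 - p.1) 2)
    else if t = 'B' then (p.1 + PySem.Int.floordiv (p.2 - p.1) 2, p.2)
    else p) (0, nrows)
  let q := ((PySem.Str.slice b_pass (some 7) none).toList).foldl (fun (q : Int × Int) t =>
    if t = 'L' then (q.1, q.1 + PySem.Int.floordiv (q.2 - q.1) 2)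
    else if t = 'R' then (q.1 + PySem.Int.floordiv (q.2 - q.1) 2, q.2)
    else q) (0, ncols)
  (p.1, q.1, p.1 * 8 + q.1)

-- ===== PRECONDITION & SPEC =====
-- little-endian binary code of the positions of the 'up' character among the tokens
def pvCode (u : Char) : List Char → Nat
  | [] => 0
  | c :: cs => (if c = u then 1 else 0) + 2 * pvCode u cs

-- final partition size: (n + code)/2^#tokens (exactly the halving loop's remaining count, in closed form)
def pvSize (n : Int) (d u : Char) (cs : List Char) : Nat :=
  let ts := cs.filter (fun c => c = d ∨ c = u)
  (n.toNat + pvCode u ts) / 2 ^ ts.length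

-- Pre_ holds exactly when Python A returns (both partitions end nonempty); A raises IndexError otherwise.
def Pre_found_seat (b_pass : String) (nrows : Int) (ncols : Int) : Prop :=
  0 < pvSize nrows 'F' 'B' (b_pass.toList.take 7) ∧ 0 < pvSize ncols 'L' 'R' (b_pass.toList.drop 7)

instance (b_pass : String) (nrows : Int) (ncols : Int) : Decidable (Pre_found_seat b_pass nrows ncols) := by
  unfold Pre_found_seat; infer_instance

def pvWitness_found_seat : String × Int × Int := ("FBFBBFFRLR", 128, 8)

def Spec_found_seat (b_pass : String) (nrows : Int) (ncols : Int) (out : Int × Int × Int) : Prop := out = found_seat_alt b_pass nrows ncols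
instance (b_pass : String) (nrows : Int) (ncols : Int) (out : Int × Int × Int) : Decidable (Spec_found_seat b_pass nrows ncols out) := by unfold Spec_found_seat; infer_instance

-- ===== CLAIM (what is proved, stated in full; the proofs are below) =====
def Claim_equal_found_seat : Prop := ∀ (b_pass : String) (nrows : Int) (ncols : Int), Dom_found_seat b_pass nrows ncols → Pre_found_seat b_pass nrows ncols → Spec_found_seat b_pass nrows ncols (found_seat b_pass nrows ncols)

-- ===== LEMMAS AND PROOFS =====

theorem pvCode_lt (u : Char) (ts : List Char) : pvCode u ts < 2 ^ ts.length := by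
  induction ts with
  | nil => simp [pvCode]
  | cons c cs ih =>
    simp only [pvCode, List.length_cons, pow_succ]
    split_ifs <;> omega

theorem pv_div2_pow (m C k : Nat) : (m / 2 + C) / 2 ^ k = (m + 2 * C) / 2 ^ (k + 1) := by
  have h2 : 2 ^ (k + 1) = 2 * 2 ^ k := by ring
  rw [h2, ← Nat.div_div_eq_div_mul, show (m + 2 * C) / 2 = m / 2 + C from by omega]

theorem pv_take_pyRange (lo hi : Int) (k : Nat) (hk : (k : Int) ≤ hi - lo) :
    (PySem.List.pyRange lo hi 1).take k = PySem.List.pyRange lo (lo + k) 1 := by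
  rw [PySem.List.pyRange_one_append lo (lo + k) hi (by omega) (by omega)]
  have hl : (PySem.List.pyRange lo (lo + k) 1).length = k := by
    rw [PySem.List.length_pyRange_one]; omega
  exact List.take_left' hl

theorem pv_drop_pyRange (lo hi : Int) (k : Nat) (hk : (k : Int) ≤ hi - lo) :
    (PySem.List.pyRange lo hi 1).drop k = PySem.List.pyRange (lo + k) hi 1 := by
  rw [PySem.List.pyRange_one_append lo (lo + k) hi (by omega) (by omega)]
  have hl : (PySem.List.pyRange lo (lo + k) 1).length = k := by
    rw [PySem.List.length_pyRange_one]; omega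
  exact List.drop_left' hl

-- the main loop correspondence: A's list loop and B's bound loop stay in lockstep,
-- and the remaining size obeys the closed form used by Pre_.
theorem pv_loop (d u : Char) (hdu : d ≠ u) (cs : List Char) (lo hi : Int) (h : lo ≤ hi)
    (lo' hi' : Int)
    (hP : cs.foldl (fun (p : Int × Int) t =>
      if t = d then (p.1, p.1 + PySem.Int.floordiv (p.2 - p.1) 2)
      else if t = u then (p.1 + PySem.Int.floordiv (p.2 - p.1) 2, p.2)
      else p) (lo, hi) = (lo', hi')) :
    lo' ≤ hi' ∧
    cs.foldl (fun rows token =>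
      if token = d then PySem.List.slice rows none (some (PySem.Int.floordiv (rows.length : Int) 2))
      else if token = u then PySem.List.slice rows (some (PySem.Int.floordiv (rows.length : Int) 2)) none
      else rows) (PySem.List.pyRange lo hi 1) = PySem.List.pyRange lo' hi' 1 ∧
    (hi' - lo').toNat = ((hi - lo).toNat + pvCode u (cs.filter (fun c => c = d ∨ c = u)))
        / 2 ^ (cs.filter (fun c => c = d ∨ c = u)).length := by
  induction cs generalizing lo hi lo' hi' with
  | nil =>
    simp only [List.foldl_nil, Prod.mk.injEq] at hP
    obtain ⟨h1, h2⟩ := hP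
    subst h1; subst h2
    simp [pvCode]; omega
  | cons c cs ih =>
    set n : Nat := (hi - lo).toNat with hn
    have hcast : hi - lo = (n : Int) := by omega
    have hflen : PySem.Int.floordiv ((PySem.List.pyRange lo hi 1).length : Int) 2 = ((n / 2 : Nat) : Int) := by
      rw [PySem.List.length_pyRange_one, ← hn]
      exact_mod_cast PySem.Int.floordiv_natCast n 2
    have hfd : PySem.Int.floordiv (hi - lo) 2 = ((n / 2 : Nat) : Int) := by
      rw [hcast]
      exact_mod_cast PySem.Int.floordiv_natCast n 2
    by_cases hc1 : c = d
    · -- 'F'/'L': keep the lower half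
      rw [List.foldl_cons, if_pos hc1, hfd] at hP
      have ihh := ih lo (lo + ((n / 2 : Nat) : Int)) (by omega) lo' hi' hP
      rw [List.foldl_cons, if_pos hc1, hflen]
      have hsl : PySem.List.slice (PySem.List.pyRange lo hi 1) none (some ((n / 2 : Nat) : Int))
          = PySem.List.pyRange lo (lo + ((n / 2 : Nat) : Int)) 1 := by
        rw [PySem.List.slice_to_natCast, pv_take_pyRange lo hi (n / 2) (by omega)]
      rw [hsl]
      refine ⟨ihh.1, ihh.2.1, ?_⟩
      rw [ihh.2.2]
      have hsz : (lo + ((n / 2 : Nat) : Int) - lo).toNat = n / 2 := by omega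
      rw [hsz]
      simp only [List.filter_cons, hc1, decide_eq_true_eq]
      rw [if_pos (by tauto)]
      simp only [pvCode, List.length_cons, if_neg hdu]
      rw [pv_div2_pow]
      ring_nf
    · by_cases hc2 : c = u
      · -- 'B'/'R': keep the upper half
        rw [List.foldl_cons, if_neg hc1, if_pos hc2, hfd] at hP
        have ihh := ih (lo + ((n / 2 : Nat) : Int)) hi (by omega) lo' hi' hP
        rw [List.foldl_cons, if_neg hc1, if_pos hc2, hflen]
        have hsl : PySem.List.slice (PySem.List.pyRange lo hi 1) (some ((n / 2 : Nat) : Int)) none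
            = PySem.List.pyRange (lo + ((n / 2 : Nat) : Int)) hi 1 := by
          rw [PySem.List.slice_from_natCast, pv_drop_pyRange lo hi (n / 2) (by omega)]
        rw [hsl]
        refine ⟨ihh.1, ihh.2.1, ?_⟩
        rw [ihh.2.2]
        have hsz : (hi - (lo + ((n / 2 : Nat) : Int))).toNat = (n + 1) / 2 := by omega
        rw [hsz]
        simp only [List.filter_cons, hc2, decide_eq_true_eq]
        rw [if_pos (by tauto)]
        simp only [pvCode, List.length_cons]
        rw [pv_div2_pow]
        norm_num
        congr 1
        omega
      · -- other character: both loops skip it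
        rw [List.foldl_cons, if_neg hc1, if_neg hc2] at hP
        have ihh := ih lo hi h lo' hi' hP
        rw [List.foldl_cons, if_neg hc1, if_neg hc2]
        refine ⟨ihh.1, ihh.2.1, ?_⟩
        rw [ihh.2.2]
        simp only [List.filter_cons, decide_eq_true_eq]
        rw [if_neg (by tauto)]

theorem pv_pre_pos (n : Int) (d u : Char) (cs : List Char) (h : 0 < pvSize n d u cs) : 0 ≤ n := by
  by_contra hn
  have hn0 : n.toNat = 0 := by omega
  unfold pvSize at h
  rw [hn0] at h
  have := pvCode_lt u (cs.filter (fun c => c = d ∨ c = u))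
  rw [Nat.div_eq_of_lt (by omega)] at h
  omega

-- ===== VERDICT (by name: the statement is the Claim_ definition above) =====
theorem found_seat_spec : Claim_equal_found_seat := by
  intro b_pass nrows ncols _hDom hPre
  obtain ⟨hr, hc⟩ := hPre
  have hnr : 0 ≤ nrows := pv_pre_pos nrows 'F' 'B' _ hr
  have hnc : 0 ≤ ncols := pv_pre_pos ncols 'L' 'R' _ hc
  have hs1 : (PySem.Str.slice b_pass none (some 7)).toList = b_pass.toList.take 7 := by
    simp only [PySem.Str.slice, PySem.Chars.slice_eq_listSlice, String.toList_ofList]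
    rw [show (7 : Int) = ((7 : Nat) : Int) by norm_num, PySem.List.slice_to_natCast]
  have hs2 : (PySem.Str.slice b_pass (some 7) none).toList = b_pass.toList.drop 7 := by
    simp only [PySem.Str.slice, PySem.Chars.slice_eq_listSlice, String.toList_ofList]
    rw [show (7 : Int) = ((7 : Nat) : Int) by norm_num, PySem.List.slice_from_natCast]
  unfold pvSize at hr hc
  set Pr := (b_pass.toList.take 7).foldl (fun (p : Int × Int) t =>
      if t = 'F' then (p.1, p.1 + PySem.Int.floordiv (p.2 - p.1) 2)
      else if t = 'B' then (p.1 + PySem.Int.floordiv (p.2 - p.1) 2, p.2)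
      else p) (0, nrows) with hPr
  set Pc := (b_pass.toList.drop 7).foldl (fun (q : Int × Int) t =>
      if t = 'L' then (q.1, q.1 + PySem.Int.floordiv (q.2 - q.1) 2)
      else if t = 'R' then (q.1 + PySem.Int.floordiv (q.2 - q.1) 2, q.2)
      else q) (0, ncols) with hPc
  have hrow := pv_loop 'F' 'B' (by decide) (b_pass.toList.take 7) 0 nrows hnr Pr.1 Pr.2 (by rw [← hPr])
  have hcol := pv_loop 'L' 'R' (by decide) (b_pass.toList.drop 7) 0 ncols hnc Pc.1 Pc.2 (by rw [← hPc])
  simp only [Int.sub_zero] at hrow hcol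
  obtain ⟨hr1, hr2, hr3⟩ := hrow
  obtain ⟨hc1, hc2, hc3⟩ := hcol
  have hrpos : Pr.1 < Pr.2 := by rw [← hr3] at hr; omega
  have hcpos : Pc.1 < Pc.2 := by rw [← hc3] at hc; omega
  unfold Spec_found_seat found_seat found_seat_alt
  simp only [hs1, hs2, ← hPr, ← hPc]
  rw [hr2, hc2]
  rw [PySem.List.pyRange_one_cons hrpos, PySem.List.pyRange_one_cons hcpos]
  simp [PySem.List.pyGetD_zero_cons]
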